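-- pv_equiv track=rewrite | github.com/gautamrwx/SAP-PI-EntryTool | underscoreToCamelCase.py | convert
-- ===== SOURCE A (Python) =====
-- def convert(inpString):
--     newString = ''
--     underScoreFlag = False
--
--     for currChar in inpString:
--         # remember the underscore character if found
--         if currChar == '_':
--             underScoreFlag = True
--             continue
--
--         # If previous char is underscore than current char will uppercase
--         if underScoreFlag:
--             newString += currChar.upper()
--             underScoreFlag = False
--             continue
--
--         newString += currChar
--
--     return newString
-- ===== SOURCE B (Python) =====
-- def convert(inpString):
--     parts = inpString.split('_')
--     return parts[0] + ''.join(p[:1].upper() + p[1:] for p in parts[1:])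
-- ===== Notes on version B (the rewrite author's own statement) =====
-- stated objective: idiomatic
-- what changed: Replaces the char-by-char scan with an underscore flag by tokenizing (split on the separator), keeping the first token verbatim and upper-casing the first character of each later token via slicing, then joining.
import Mathlib
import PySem

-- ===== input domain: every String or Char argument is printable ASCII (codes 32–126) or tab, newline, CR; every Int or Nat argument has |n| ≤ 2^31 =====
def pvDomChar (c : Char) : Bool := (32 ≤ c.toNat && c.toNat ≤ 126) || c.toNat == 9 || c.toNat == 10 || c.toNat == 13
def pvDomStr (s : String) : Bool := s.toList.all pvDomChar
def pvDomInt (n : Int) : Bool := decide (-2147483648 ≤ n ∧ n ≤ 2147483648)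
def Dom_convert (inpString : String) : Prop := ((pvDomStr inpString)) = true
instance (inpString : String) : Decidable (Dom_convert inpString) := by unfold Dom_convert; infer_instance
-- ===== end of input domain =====

-- B tokenizes on '_' instead of scanning characters with a flag; same output, same O(n) cost (objective: idiomatic).

-- ===== PORT A =====
-- char-by-char loop carrying (newString, underScoreFlag)
def convert (inpString : String) : String :=
  let r := inpString.toList.foldl
    (fun (st : List Char × Bool) currChar =>
      if currChar = '_' then (st.1, true)
      else if st.2 then (st.1 ++ [PySem.Chars.upperChar currChar], false)
      else (st.1 ++ [currChar], false))
    ([], false)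
  String.mk r.1

-- ===== PORT B =====
-- p[:1].upper() + p[1:]
def pvCapFirst (p : List Char) : List Char :=
  PySem.Chars.upper (PySem.List.slice p none (some 1)) ++ PySem.List.slice p (some 1) none

-- parts = inpString.split('_'); parts[0] + ''.join(capFirst(p) for p in parts[1:])
-- (split always returns a nonempty list, so parts[0] is parts.headI)
def convert_alt (inpString : String) : String :=
  let parts := PySem.Chars.splitOn inpString.toList ['_']
  String.mk (parts.headI ++ PySem.Chars.join [] (parts.tail.map pvCapFirst))

-- ===== PRECONDITION & SPEC =====
def Spec_convert (inpString : String) (out : String) : Prop := out = convert_alt inpString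
instance (inpString : String) (out : String) : Decidable (Spec_convert inpString out) := by unfold Spec_convert; infer_instance

-- ===== CLAIM (what is proved, stated in full; the proofs are below) =====
def Claim_equal_convert : Prop := ∀ (inpString : String), Dom_convert inpString → Spec_convert inpString (convert inpString)

-- ===== LEMMAS AND PROOFS =====

-- clean recursive form of split-on-'_'
def pvSp : List Char → List (List Char)
  | [] => [[]]
  | c :: t => if c = '_' then [] :: pvSp t else (c :: (pvSp t).headI) :: (pvSp t).tail

-- clean recursive form of A's loop body (flag = underScoreFlag)
def pvConv : List Char → Bool → List Char
  | [], _ => []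
  | c :: t, flag =>
      if c = '_' then pvConv t true
      else (if flag then PySem.Chars.upperChar c else c) :: pvConv t false

lemma pvModifyHead_id {α : Type} (l : List α) : List.modifyHead (fun x => x) l = l := by
  cases l <;> simp

lemma pvSp_ne_nil (l : List Char) : pvSp l ≠ [] := by
  cases l with
  | nil => simp [pvSp]
  | cons c t => by_cases h : c = '_' <;> simp [pvSp, h]

lemma go_spec : ∀ (fuel : Nat) (l cur : List Char) (acc : List (List Char)),
    l.length ≤ fuel →
    PySem.Chars.splitOn.go ['_'] fuel l cur acc
      = acc.reverse ++ (pvSp l).modifyHead (cur.reverse ++ ·) := by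
  intro fuel
  induction fuel with
  | zero =>
    intro l cur acc h
    have : l = [] := by cases l <;> simp_all
    subst this
    simp [PySem.Chars.splitOn.go, pvSp]
  | succ n ih =>
    intro l cur acc h
    cases l with
    | nil => simp [PySem.Chars.splitOn.go, pvSp]
    | cons c rest =>
      by_cases hc : c = '_'
      · subst hc
        have hp : List.isPrefixOf ['_'] ('_' :: rest) = true := by
          simp [List.isPrefixOf]
        rw [PySem.Chars.splitOn.go, if_pos hp]
        simp only [List.length_cons] at h
        rw [ih _ _ _ (by simp; omega)]
        simp [pvSp]
        exact pvModifyHead_id _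
      · have hp : List.isPrefixOf ['_'] (c :: rest) = false := by
          simp [List.isPrefixOf]
          exact fun h' => hc h'.symm
        rw [PySem.Chars.splitOn.go, if_neg (by simp [hp])]
        simp only [List.length_cons] at h
        rw [ih _ _ _ (by omega)]
        simp only [pvSp, if_neg hc]
        obtain ⟨x, xs, hx⟩ := List.exists_cons_of_ne_nil (pvSp_ne_nil rest)
        rw [hx]
        simp

lemma splitOn_eq_pvSp (l : List Char) : PySem.Chars.splitOn l ['_'] = pvSp l := by
  rw [PySem.Chars.splitOn, go_spec (l.length + 1) l [] [] (by omega)]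
  obtain ⟨x, xs, hx⟩ := List.exists_cons_of_ne_nil (pvSp_ne_nil l)
  rw [hx]; simp

lemma foldA_spec : ∀ (l acc : List Char) (flag : Bool),
    (l.foldl
      (fun (st : List Char × Bool) currChar =>
        if currChar = '_' then (st.1, true)
        else if st.2 then (st.1 ++ [PySem.Chars.upperChar currChar], false)
        else (st.1 ++ [currChar], false))
      (acc, flag)).1 = acc ++ pvConv l flag := by
  intro l
  induction l with
  | nil => intro acc flag; simp [pvConv]
  | cons c t ih =>
    intro acc flag
    by_cases hc : c = '_'
    · subst hc; simp only [List.foldl_cons, if_pos rfl, pvConv, if_pos rfl]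
      exact ih acc true
    · cases flag <;>
        simp only [List.foldl_cons, if_neg hc, pvConv, Bool.false_eq_true,
          if_false, if_true, ih, List.append_assoc, List.singleton_append]

lemma join_nil_eq_flatten (ps : List (List Char)) :
    PySem.Chars.join [] ps = ps.flatten := by
  induction ps with
  | nil => simp [PySem.Chars.join, List.intercalate]
  | cons p ps ih =>
    cases ps <;> simp_all [PySem.Chars.join, List.intercalate, List.intersperse]

lemma pvCapFirst_nil : pvCapFirst [] = [] := by decide

lemma pvCapFirst_cons (c : Char) (h : List Char) :
    pvCapFirst (c :: h) = PySem.Chars.upperChar c :: h := by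
  simp [pvCapFirst, PySem.List.slice, PySem.Chars.upper]

lemma sp_conv (l : List Char) :
    (pvSp l).headI ++ ((pvSp l).tail.map pvCapFirst).flatten = pvConv l false ∧
    ((pvSp l).map pvCapFirst).flatten = pvConv l true := by
  induction l with
  | nil => simp [pvSp, pvConv, pvCapFirst_nil]
  | cons c t ih =>
    by_cases hc : c = '_'
    · subst hc
      constructor
      · simp only [pvSp, if_pos rfl, pvConv, List.headI, List.tail,
          List.nil_append]
        exact ih.2
      · simp only [pvSp, if_pos rfl, pvConv, List.map_cons, List.flatten_cons,
          pvCapFirst_nil, List.nil_append]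
        exact ih.2
    · obtain ⟨x, xs, hx⟩ := List.exists_cons_of_ne_nil (pvSp_ne_nil t)
      rw [hx] at ih
      simp only [List.headI, List.tail_cons] at ih
      constructor
      · simp only [pvSp, if_neg hc, hx, List.headI, List.tail_cons, pvConv,
          List.cons_append, ih.1, if_neg hc]
        simp
      · simp only [pvSp, if_neg hc, hx, List.headI, List.tail_cons, pvConv,
          List.map_cons, List.flatten_cons, pvCapFirst_cons, List.cons_append,
          ih.1]
        simp

-- ===== VERDICT (by name: the statement is the Claim_ definition above) =====
theorem convert_spec : Claim_equal_convert := by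
  intro s _
  unfold Spec_convert convert convert_alt
  simp only [splitOn_eq_pvSp, join_nil_eq_flatten, foldA_spec, List.nil_append,
    (sp_conv s.toList).1]
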